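-- pv_equiv track=rewrite | github.com/scottwshaw/genai-learning-agent | agent_utils.py | _summarize_brief
-- ===== SOURCE A (Python) =====
-- def _summarize_brief(text: str) -> str:
--     """Extract only Key Developments and Notable Papers/Models/Tools sections.
--
--     Keeps the H1 title line and the two sections needed for deduplication.
--     Drops Technical Deep-Dive, Landscape Trends, Vendor Landscape, and Sources.
--     """
--     lines = text.split("\n")
--     out: list[str] = []
--     # Keep sections whose H2 heading starts with these prefixes
--     keep_prefixes = ("## Key Developments", "## Key Releases",
--                      "## Notable Papers")
--     keeping = False
--
--     for line in lines:
--         # Always keep the H1 title line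
--         if line.startswith("# ") and not line.startswith("## "):
--             out.append(line)
--             keeping = False
--             continue
--         # H2 heading: decide whether to keep this section
--         if line.startswith("## "):
--             keeping = any(line.startswith(p) for p in keep_prefixes)
--         if keeping:
--             out.append(line)
--
--     return "\n".join(out).strip()
-- ===== SOURCE B (Python) =====
-- KEEP_PREFIXES = ("## Key Developments", "## Key Releases", "## Notable Papers")
--
--
-- def _is_heading(line):
--     return line.startswith("# ") or line.startswith("## ")
--
--
-- def _emit_blocks(lines):
--     """lines starts at a heading (or is empty); return the kept lines."""
--     if not lines:
--         return []
--     head, rest = lines[0], lines[1:]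
--     body = []
--     while rest and not _is_heading(rest[0]):
--         body.append(rest[0])
--         rest = rest[1:]
--     if not head.startswith("## "):      # H1 block: keep the heading line only
--         return [head] + _emit_blocks(rest)
--     if head.startswith(KEEP_PREFIXES):  # kept H2 block: heading plus body
--         return [head] + body + _emit_blocks(rest)
--     return _emit_blocks(rest)           # dropped H2 block
--
--
-- def _summarize_brief(text: str) -> str:
--     lines = text.split("\n")
--     # everything before the first heading is discarded
--     while lines and not _is_heading(lines[0]):
--         lines = lines[1:]
--     return "\n".join(_emit_blocks(lines)).strip()
-- ===== Notes on version B (the rewrite author's own statement) =====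
-- stated objective: alternative
-- what changed: Replaces the per-line 'keeping' boolean state machine with a build-blocks-then-filter decomposition: drop lines before the first heading, segment the rest into heading-led blocks, emit the heading for H1 blocks and the whole block for H2 blocks whose heading starts with a keep prefix.
import Mathlib
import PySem

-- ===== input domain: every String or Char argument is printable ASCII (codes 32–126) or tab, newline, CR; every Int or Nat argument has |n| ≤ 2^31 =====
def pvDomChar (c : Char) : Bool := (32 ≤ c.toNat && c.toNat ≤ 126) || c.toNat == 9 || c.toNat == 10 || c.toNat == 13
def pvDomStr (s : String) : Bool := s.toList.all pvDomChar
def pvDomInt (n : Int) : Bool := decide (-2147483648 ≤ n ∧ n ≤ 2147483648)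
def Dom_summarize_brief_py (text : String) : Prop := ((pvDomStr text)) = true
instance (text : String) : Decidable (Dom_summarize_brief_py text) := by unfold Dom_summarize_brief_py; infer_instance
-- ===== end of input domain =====

-- B replaces A's per-line boolean 'keeping' state machine by a segment-into-heading-led-blocks-then-filter decomposition (objective: alternative).

-- ===== PORT A =====
-- A, line for line: split on '\n', fold the (out, keeping) state over the lines, join and strip.
def summarize_brief_py (text : String) : String :=
  let lines := PySem.Chars.splitOn text.toList ['\n']
  let keep_prefixes : List (List Char) :=
    ["## Key Developments".toList, "## Key Releases".toList, "## Notable Papers".toList]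
  let r := lines.foldl (fun (st : List (List Char) × Bool) line =>
    if PySem.Chars.startswith line "# ".toList && !(PySem.Chars.startswith line "## ".toList) then
      (st.1 ++ [line], false)
    else
      let keeping := if PySem.Chars.startswith line "## ".toList then
          keep_prefixes.any (fun p => PySem.Chars.startswith line p) else st.2
      if keeping then (st.1 ++ [line], keeping) else (st.1, keeping)) ([], false)
  String.ofList (PySem.Chars.strip (PySem.Chars.join ['\n'] r.1))

-- ===== PORT B =====
def pvIsHeading (line : List Char) : Bool :=
  PySem.Chars.startswith line "# ".toList || PySem.Chars.startswith line "## ".toList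

def pvKeepHead (line : List Char) : Bool :=
  PySem.Chars.startswith line "## Key Developments".toList ||
  PySem.Chars.startswith line "## Key Releases".toList ||
  PySem.Chars.startswith line "## Notable Papers".toList

-- blocks start at a heading line; emit the heading for H1 blocks, the whole block for kept H2 blocks
def pvEmitBlocks : List (List Char) → List (List Char)
  | [] => []
  | head :: rest =>
    let body := rest.takeWhile (fun l => !pvIsHeading l)
    let rest' := rest.dropWhile (fun l => !pvIsHeading l)
    if !(PySem.Chars.startswith head "## ".toList) then
      head :: pvEmitBlocks rest'
    else if pvKeepHead head then
      (head :: body) ++ pvEmitBlocks rest'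
    else
      pvEmitBlocks rest'
termination_by ls => ls.length
decreasing_by
  all_goals exact Nat.lt_succ_of_le (List.length_dropWhile_le _ _)

def summarize_brief_py_alt (text : String) : String :=
  let lines := (PySem.Chars.splitOn text.toList ['\n']).dropWhile (fun l => !pvIsHeading l)
  String.ofList (PySem.Chars.strip (PySem.Chars.join ['\n'] (pvEmitBlocks lines)))

-- ===== PRECONDITION & SPEC =====
def Spec_summarize_brief_py (text : String) (out : String) : Prop := out = summarize_brief_py_alt text
instance (text : String) (out : String) : Decidable (Spec_summarize_brief_py text out) := by unfold Spec_summarize_brief_py; infer_instance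

-- ===== CLAIM (what is proved, stated in full; the proofs are below) =====
def Claim_equal_summarize_brief_py : Prop := ∀ (text : String), Dom_summarize_brief_py text → Spec_summarize_brief_py text (summarize_brief_py text)

-- ===== LEMMAS AND PROOFS =====

-- A's loop as a pure recursion over the remaining lines, parameterised by the 'keeping' flag.
def pvRunA (k : Bool) : List (List Char) → List (List Char)
  | [] => []
  | l :: ls =>
    if PySem.Chars.startswith l "# ".toList && !(PySem.Chars.startswith l "## ".toList) then
      l :: pvRunA false ls
    else
      let k' := if PySem.Chars.startswith l "## ".toList then pvKeepHead l else k
      if k' then l :: pvRunA k' ls else pvRunA k' ls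

theorem pvFoldA_eq_runA (ls : List (List Char)) : ∀ (out : List (List Char)) (k : Bool),
    (ls.foldl (fun (st : List (List Char) × Bool) line =>
      if PySem.Chars.startswith line "# ".toList && !(PySem.Chars.startswith line "## ".toList) then
        (st.1 ++ [line], false)
      else
        let keeping := if PySem.Chars.startswith line "## ".toList then
            (["## Key Developments".toList, "## Key Releases".toList, "## Notable Papers".toList]).any
              (fun p => PySem.Chars.startswith line p) else st.2
        if keeping then (st.1 ++ [line], keeping) else (st.1, keeping)) (out, k)).1
    = out ++ pvRunA k ls := by
  induction ls with
  | nil => intro out k; simp [pvRunA]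
  | cons l ls ih =>
    intro out k
    simp only [List.foldl_cons]
    simp at ih
    by_cases hs1 : PySem.Chars.startswith l ['#', ' '] = true <;>
      by_cases hs2 : PySem.Chars.startswith l ['#', '#', ' '] = true <;>
      by_cases ha : PySem.Chars.startswith l ['#', '#', ' ', 'K', 'e', 'y', ' ', 'D', 'e', 'v', 'e', 'l', 'o', 'p', 'm', 'e', 'n', 't', 's'] = true <;>
      by_cases hb : PySem.Chars.startswith l ['#', '#', ' ', 'K', 'e', 'y', ' ', 'R', 'e', 'l', 'e', 'a', 's', 'e', 's'] = true <;>
      by_cases hc : PySem.Chars.startswith l ['#', '#', ' ', 'N', 'o', 't', 'a', 'b', 'l', 'e', ' ', 'P', 'a', 'p', 'e', 'r', 's'] = true <;>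
      cases k <;>
      simp [pvRunA, pvKeepHead, List.append_assoc, hs1, hs2, ha, hb, hc, ih]

theorem pvRunA_eq_emitBlocks (ls : List (List Char)) :
    pvRunA false ls = pvEmitBlocks (ls.dropWhile (fun l => !pvIsHeading l)) ∧
    pvRunA true ls = ls.takeWhile (fun l => !pvIsHeading l)
      ++ pvEmitBlocks (ls.dropWhile (fun l => !pvIsHeading l)) := by
  induction ls with
  | nil => simp [pvRunA, pvEmitBlocks]
  | cons l ls ih =>
    obtain ⟨ihf, iht⟩ := ih
    by_cases hs2 : PySem.Chars.startswith l ['#', '#', ' '] = true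
    · -- H2 heading block
      have hH : pvIsHeading l = true := by simp [pvIsHeading, hs2]
      have hd : (l :: ls).dropWhile (fun l => !pvIsHeading l) = l :: ls := by simp [hH]
      have ht : (l :: ls).takeWhile (fun l => !pvIsHeading l) = [] := by simp [hH]
      rw [hd, ht]
      by_cases ha : PySem.Chars.startswith l ['#', '#', ' ', 'K', 'e', 'y', ' ', 'D', 'e', 'v', 'e', 'l', 'o', 'p', 'm', 'e', 'n', 't', 's'] = true <;>
        by_cases hb : PySem.Chars.startswith l ['#', '#', ' ', 'K', 'e', 'y', ' ', 'R', 'e', 'l', 'e', 'a', 's', 'e', 's'] = true <;>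
        by_cases hc : PySem.Chars.startswith l ['#', '#', ' ', 'N', 'o', 't', 'a', 'b', 'l', 'e', ' ', 'P', 'a', 'p', 'e', 'r', 's'] = true <;>
        constructor <;>
        simp [pvRunA, pvEmitBlocks, pvKeepHead, hs2, ha, hb, hc, ihf, iht]
    · by_cases hs1 : PySem.Chars.startswith l ['#', ' '] = true
      · -- H1 heading block
        have hH : pvIsHeading l = true := by simp [pvIsHeading, hs1]
        have hd : (l :: ls).dropWhile (fun l => !pvIsHeading l) = l :: ls := by simp [hH]
        have ht : (l :: ls).takeWhile (fun l => !pvIsHeading l) = [] := by simp [hH]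
        rw [hd, ht]
        constructor <;> simp [pvRunA, pvEmitBlocks, hs1, hs2, ihf]
      · -- not a heading: skipped by the leading dropWhile, body line inside a block
        have hH : pvIsHeading l = false := by simp [pvIsHeading, hs1, hs2]
        constructor <;> simp [pvRunA, hs1, hs2, hH, ihf, iht]

-- ===== VERDICT (by name: the statement is the Claim_ definition above) =====
theorem summarize_brief_py_spec : Claim_equal_summarize_brief_py := by
  intro text _
  unfold Spec_summarize_brief_py summarize_brief_py summarize_brief_py_alt
  simp only [pvFoldA_eq_runA, List.nil_append,
    (pvRunA_eq_emitBlocks (PySem.Chars.splitOn text.toList ['\n'])).1]
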